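-- pv_equiv track=rewrite | github.com/raullenchai/vllm-mlx | vllm_mlx/service/postprocessor.py | _find_json_start
-- ===== SOURCE A (Python) =====
-- def _find_json_start(text: str) -> int:
--     """Find the first `{` or `[` that is NOT inside `<think>...</think>` tags.
--
--     Returns the index in ``text``, or -1 if no JSON delimiter found outside
--     think blocks.  Handles unclosed `<think>` (still accumulating) by
--     treating everything after it as inside the block.
--     """
--     in_think = False
--     i = 0
--     while i < len(text):
--         # Check for <think> open tag
--         if text[i : i + 7] == "<think>":
--             in_think = True
--             i += 7
--             continue
--         # Check for </think> close tag
--         if text[i : i + 8] == "</think>":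
--             in_think = False
--             i += 8
--             continue
--         # Outside think block — check for JSON delimiter
--         if not in_think and text[i] in ("{", "["):
--             return i
--         i += 1
--     return -1
-- ===== SOURCE B (Python) =====
-- def _find_json_start(text: str) -> int:
--     """Recursive think-block decomposition: scan the text before the first
--     <think> tag for a delimiter, otherwise skip the whole <think>...</think>
--     block with str.find and recurse on the remainder."""
--     open_i = text.find("<think>")
--     head = text if open_i == -1 else text[:open_i]
--     for j, ch in enumerate(head):
--         if ch in "{[":
--             return j
--     if open_i == -1:
--         return -1
--     close_i = text.find("</think>", open_i + 7)
--     if close_i == -1: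
--         return -1
--     rest = _find_json_start(text[close_i + 8:])
--     return rest if rest == -1 else close_i + 8 + rest
-- ===== Notes on version B (the rewrite author's own statement) =====
-- stated objective: faster
-- what changed: Replaced the char-by-char flag-toggling state machine by a recursive think-block decomposition: str.find locates the next <think> tag, a plain scan of the text before it looks for a delimiter, str.find then jumps past the matching </think> and the function recurses on the remaining suffix, offsetting the recursive result.
import Mathlib
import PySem

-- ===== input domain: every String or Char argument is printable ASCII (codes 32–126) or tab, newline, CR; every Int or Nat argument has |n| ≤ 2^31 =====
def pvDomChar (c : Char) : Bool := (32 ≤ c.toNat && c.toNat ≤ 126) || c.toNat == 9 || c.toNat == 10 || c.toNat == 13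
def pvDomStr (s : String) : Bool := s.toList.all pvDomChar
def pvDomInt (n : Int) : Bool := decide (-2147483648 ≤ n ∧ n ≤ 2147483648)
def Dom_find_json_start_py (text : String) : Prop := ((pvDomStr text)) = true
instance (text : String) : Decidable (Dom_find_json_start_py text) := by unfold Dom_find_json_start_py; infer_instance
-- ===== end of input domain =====

-- B replaces A's char-by-char flag-toggling state machine by a recursive think-block
-- decomposition (str.find locates the tags, the pre-tag segment is scanned for a
-- delimiter, then the function recurses past the closing tag); same O(n), measured
-- constant-factor faster in Python (str.find does the scanning).

def fjOpenTag : List Char := ['<', 't', 'h', 'i', 'n', 'k', '>']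
def fjCloseTag : List Char := ['<', '/', 't', 'h', 'i', 'n', 'k', '>']

-- ===== PORT A =====
-- A's while loop over index i with slice comparisons text[i:i+7]/text[i:i+8];
-- slices on the char list are List.take/List.drop, exact for any string.
def findJsonGoA (cs : List Char) (i : Int) (inThink : Bool) : Int :=
  match cs with
  | [] => -1
  | c :: rest =>
    if (c :: rest).take 7 = fjOpenTag then
      findJsonGoA ((c :: rest).drop 7) (i + 7) true
    else if (c :: rest).take 8 = fjCloseTag then
      findJsonGoA ((c :: rest).drop 8) (i + 8) false
    else if !inThink && (c = '{' || c = '[') then i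
    else findJsonGoA rest (i + 1) inThink
termination_by cs.length
decreasing_by
  all_goals simp [List.length_drop]

def find_json_start_py (text : String) : Int :=
  findJsonGoA text.toList 0 false

-- ===== PORT B =====
-- Source B's 'for j, ch in enumerate(head): if ch in "{[": return j' loop
def fjbHeadScan (l : List (Int × Char)) : Option Int :=
  match l with
  | [] => none
  | (j, ch) :: rest => if ch = '{' || ch = '[' then some j else fjbHeadScan rest

-- length bound used by the termination argument of findJsonB (cited in decreasing_by)
lemma fjb_drop_lt (cs : List Char) (openI : Int) (ho : openI = PySem.Chars.find cs fjOpenTag)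
    (hne : ¬ openI = -1) (closeI : Int)
    (hc : closeI = PySem.Chars.findFrom cs fjCloseTag (openI + 7)) (hcne : ¬ closeI = -1) :
    (PySem.List.slice cs (some (closeI + 8)) none).length < cs.length := by
  have h0 : 0 ≤ openI := by
    have := PySem.Chars.neg_one_le_find cs fjOpenTag; omega
  obtain ⟨hpre, -⟩ := PySem.Chars.find_spec (s := cs) (sub := fjOpenTag) (by rw [← ho] at *; omega)
  rw [← ho] at hpre
  have hlen7 : openI.toNat + 7 ≤ cs.length := by
    have := hpre.length_le
    simp [fjOpenTag] at this
    omega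
  have hcast : (openI + 7 : Int) = ((openI.toNat + 7 : Nat) : Int) := by push_cast; omega
  rw [hcast, PySem.Chars.findFrom_natCast cs fjCloseTag (openI.toNat + 7) hlen7] at hc
  have hc0 : 0 ≤ closeI + 8 := by
    by_cases hfi : PySem.Chars.find (List.drop (openI.toNat + 7) cs) fjCloseTag = -1
    · simp [hfi] at hc; omega
    · simp [hfi] at hc
      have := PySem.Chars.neg_one_le_find (List.drop (openI.toNat + 7) cs) fjCloseTag
      omega
  rw [PySem.List.slice_from cs hc0]
  have : 1 ≤ (closeI + 8).toNat := by
    by_cases hfi : PySem.Chars.find (List.drop (openI.toNat + 7) cs) fjCloseTag = -1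
    · simp [hfi] at hc; omega
    · simp [hfi] at hc
      have := PySem.Chars.neg_one_le_find (List.drop (openI.toNat + 7) cs) fjCloseTag
      omega
  simp only [List.length_drop]
  omega

-- Source B's recursion: head segment before the first <think>, then skip to past </think>
def findJsonB (cs : List Char) : Int :=
  let openI := PySem.Chars.find cs fjOpenTag
  let head := if openI = -1 then cs else PySem.List.slice cs none (some openI)
  match fjbHeadScan (PySem.List.enumerate head 0) with
  | some j => j
  | none =>
    if h1 : openI = -1 then -1
    else
      let closeI := PySem.Chars.findFrom cs fjCloseTag (openI + 7)
      if h2 : closeI = -1 then -1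
      else
        let rest := findJsonB (PySem.List.slice cs (some (closeI + 8)) none)
        if rest = -1 then -1 else closeI + 8 + rest
termination_by cs.length
decreasing_by
  exact fjb_drop_lt cs _ rfl h1 _ rfl h2

def find_json_start_py_alt (text : String) : Int :=
  findJsonB text.toList

-- ===== PRECONDITION & SPEC =====
def Spec_find_json_start_py (text : String) (out : Int) : Prop := out = find_json_start_py_alt text
instance (text : String) (out : Int) : Decidable (Spec_find_json_start_py text out) := by unfold Spec_find_json_start_py; infer_instance

-- ===== CLAIM (what is proved, stated in full; the proofs are below) =====
def Claim_equal_find_json_start_py : Prop := ∀ (text : String), Dom_find_json_start_py text → Spec_find_json_start_py text (find_json_start_py text)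

-- ===== LEMMAS AND PROOFS =====

lemma goA_ge (n : Nat) : ∀ cs : List Char, cs.length ≤ n → ∀ (i : Int) (b : Bool),
    findJsonGoA cs i b = -1 ∨ i ≤ findJsonGoA cs i b := by
  induction n with
  | zero =>
    intro cs h i b
    have : cs = [] := List.eq_nil_of_length_eq_zero (Nat.le_zero.mp h)
    subst this; simp [findJsonGoA]
  | succ n ih =>
    intro cs h i b
    match cs with
    | [] => simp [findJsonGoA]
    | c :: rest =>
      rw [findJsonGoA]
      split_ifs with h7 h8 hd
      · rcases ih ((c :: rest).drop 7) (by simp at h ⊢; omega) (i + 7) true with h' | h' <;> omega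
      · rcases ih ((c :: rest).drop 8) (by simp at h ⊢; omega) (i + 8) false with h' | h' <;> omega
      · omega
      · rcases ih rest (by simp at h; omega) (i + 1) b with h' | h' <;> omega

lemma goA_shift (n : Nat) : ∀ cs : List Char, cs.length ≤ n → ∀ (d : Int) (b : Bool), 0 ≤ d →
    findJsonGoA cs d b = if findJsonGoA cs 0 b = -1 then -1 else d + findJsonGoA cs 0 b := by
  induction n with
  | zero =>
    intro cs h d b _
    have : cs = [] := List.eq_nil_of_length_eq_zero (Nat.le_zero.mp h)
    subst this; simp [findJsonGoA]
  | succ n ih =>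
    intro cs h d b hd0
    match cs with
    | [] => simp [findJsonGoA]
    | c :: rest =>
      rw [findJsonGoA, findJsonGoA]
      simp only [zero_add]
      by_cases h7 : (c :: rest).take 7 = fjOpenTag
      · simp only [if_pos h7]
        rw [ih ((c :: rest).drop 7) (by simp at h ⊢; omega) (d + 7) true (by omega),
            ih ((c :: rest).drop 7) (by simp at h ⊢; omega) 7 true (by omega)]
        rcases goA_ge ((c :: rest).drop 7).length _ le_rfl 0 true with h' | h' <;>
          split_ifs at * <;> omega
      · simp only [if_neg h7]
        by_cases h8 : (c :: rest).take 8 = fjCloseTag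
        · simp only [if_pos h8]
          rw [ih ((c :: rest).drop 8) (by simp at h ⊢; omega) (d + 8) false (by omega),
              ih ((c :: rest).drop 8) (by simp at h ⊢; omega) 8 false (by omega)]
          rcases goA_ge ((c :: rest).drop 8).length _ le_rfl 0 false with h' | h' <;>
            split_ifs at * <;> omega
        · simp only [if_neg h8]
          by_cases hdl : (!b && (c = '{' || c = '[')) = true
          · simp only [if_pos hdl]
            norm_num
          · simp only [if_neg hdl]
            rw [ih rest (by simp at h; omega) (d + 1) b (by omega),
                ih rest (by simp at h; omega) 1 b (by omega)]
            rcases goA_ge rest.length rest le_rfl 0 b with h' | h' <;>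
              split_ifs at * <;> omega



lemma goA_no_open (n : Nat) : ∀ cs : List Char, cs.length ≤ n → ¬ fjOpenTag <:+: cs →
    ∀ i : Int, findJsonGoA cs i false = (fjbHeadScan (PySem.List.enumerate cs i)).getD (-1) := by
  induction n with
  | zero =>
    intro cs h hno i
    have : cs = [] := List.eq_nil_of_length_eq_zero (Nat.le_zero.mp h)
    subst this; simp [findJsonGoA, fjbHeadScan]
  | succ n ih =>
    intro cs h hno i
    match cs with
    | [] => simp [findJsonGoA, PySem.List.enumerate, fjbHeadScan]
    | c :: rest =>
      rw [findJsonGoA]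
      by_cases h7 : (c :: rest).take 7 = fjOpenTag
      · exact absurd ((h7 ▸ List.take_prefix 7 (c :: rest)).isInfix) hno
      · simp only [if_neg h7]
        by_cases h8 : (c :: rest).take 8 = fjCloseTag
        · simp only [if_pos h8]
          have hsplit : c :: rest = fjCloseTag ++ (c :: rest).drop 8 := by
            conv_lhs => rw [← List.take_append_drop 8 (c :: rest)]
            rw [h8]
          have hsuf : (c :: rest).drop 8 <:+: c :: rest := (List.drop_suffix 8 _).isInfix
          have hno' : ¬ fjOpenTag <:+: (c :: rest).drop 8 := fun hx => hno (hx.trans hsuf)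
          have hlen : ((c :: rest).drop 8).length ≤ n := by simp at h ⊢; omega
          rw [ih ((c :: rest).drop 8) hlen hno' (i + 8)]
          conv_rhs => rw [hsplit]
          simp [fjCloseTag, PySem.List.enumerate_cons, fjbHeadScan]
          have e8 : i + 1 + 1 + 1 + 1 + 1 + 1 + 1 + 1 = i + 8 := by ring
          rw [e8]
        · simp only [if_neg h8]
          have hno' : ¬ fjOpenTag <:+: rest := fun hx => hno (List.infix_cons hx)
          have hlen : rest.length ≤ n := by simp at h; omega
          rw [PySem.List.enumerate_cons]
          by_cases hd : (c = '{' || c = '[') = true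
          · simp [hd, fjbHeadScan]
          · simp [hd, fjbHeadScan, ih rest hlen hno' (i + 1)]

lemma goA_to_open (o : Nat) : ∀ cs : List Char, fjOpenTag <+: cs.drop o →
    (∀ k < o, ¬ fjOpenTag <+: cs.drop k) → ∀ i : Int,
    findJsonGoA cs i false =
      (match fjbHeadScan (PySem.List.enumerate (cs.take o) i) with
       | some j => j
       | none => findJsonGoA (cs.drop o) (i + o) false) := by
  induction o using Nat.strong_induction_on with
  | _ o ih =>
    intro cs hpre hmin i
    by_cases ho : o = 0
    · subst ho
      simp [PySem.List.enumerate, fjbHeadScan]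
    · have ho1 : 1 ≤ o := by omega
      match cs with
      | [] => simp [fjOpenTag] at hpre
      | c :: rest =>
        rw [findJsonGoA]
        by_cases h7 : (c :: rest).take 7 = fjOpenTag
        · exact absurd (h7 ▸ List.take_prefix 7 (c :: rest)) (by simpa using hmin 0 (by omega))
        · simp only [if_neg h7]
          by_cases h8 : (c :: rest).take 8 = fjCloseTag
          · simp only [if_pos h8]
            have hsplit : c :: rest = fjCloseTag ++ (c :: rest).drop 8 := by
              conv_lhs => rw [← List.take_append_drop 8 (c :: rest)]
              rw [h8]
            have h8o : 8 ≤ o := by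
              by_contra hlt
              rw [hsplit] at hpre
              interval_cases o <;>
                simp [fjCloseTag, fjOpenTag, List.cons_prefix_iff] at hpre
            have hpre' : fjOpenTag <+: ((c :: rest).drop 8).drop (o - 8) := by
              rw [List.drop_drop]
              have : 8 + (o - 8) = o := by omega
              rw [this]; exact hpre
            have hmin' : ∀ k < o - 8, ¬ fjOpenTag <+: ((c :: rest).drop 8).drop k := by
              intro k hk
              rw [List.drop_drop]
              exact hmin (8 + k) (by omega)
            have hih := ih (o - 8) (by omega) ((c :: rest).drop 8) hpre' hmin' (i + 8)
            rw [hih]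
            have e_take : (c :: rest).take o = fjCloseTag ++ ((c :: rest).drop 8).take (o - 8) := by
              conv_lhs => rw [hsplit]
              rw [List.take_append]
              congr 1
              exact List.take_of_length_le (by simp [fjCloseTag]; omega)
            rw [e_take]
            have e_drop : ((c :: rest).drop 8).drop (o - 8) = (c :: rest).drop o := by
              rw [List.drop_drop]; congr 1; omega
            have e_off : i + 8 + ((o - 8 : Nat) : Int) = i + o := by
              have : ((o - 8 : Nat) : Int) = (o : Int) - 8 := by omega
              rw [this]; ring
            rw [e_drop, e_off]
            cases hsc : fjbHeadScan (PySem.List.enumerate (((c :: rest).drop 8).take (o - 8)) (i + 8)) with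
            | none =>
              simp only [fjCloseTag, PySem.List.enumerate_cons, List.cons_append, List.nil_append] at *
              simp [fjbHeadScan]
              have e8 : i + 1 + 1 + 1 + 1 + 1 + 1 + 1 + 1 = i + 8 := by ring
              simp only [List.drop_succ_cons] at hsc
              rw [e8, hsc]
            | some j =>
              simp only [fjCloseTag, PySem.List.enumerate_cons, List.cons_append, List.nil_append] at *
              simp [fjbHeadScan]
              have e8 : i + 1 + 1 + 1 + 1 + 1 + 1 + 1 + 1 = i + 8 := by ring
              simp only [List.drop_succ_cons] at hsc
              rw [e8, hsc]
          · simp only [if_neg h8]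
            by_cases hd : (!false && (c = '{' || c = '[')) = true
            · simp only [if_pos hd]
              have e_take : (c :: rest).take o = c :: rest.take (o - 1) := by
                conv_lhs => rw [show o = (o-1)+1 from by omega, List.take_succ_cons]
              rw [e_take, PySem.List.enumerate_cons]
              simp only [Bool.not_false, Bool.true_and] at hd
              simp [fjbHeadScan, hd]
            · simp only [if_neg hd]
              have hpre' : fjOpenTag <+: rest.drop (o - 1) := by
                have : rest.drop (o - 1) = (c :: rest).drop o := by
                  conv_rhs => rw [show o = (o-1)+1 from by omega, List.drop_succ_cons]
                rw [this]; exact hpre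
              have hmin' : ∀ k < o - 1, ¬ fjOpenTag <+: rest.drop k := by
                intro k hk
                have : rest.drop k = (c :: rest).drop (k + 1) := by rw [List.drop_succ_cons]
                rw [this]
                exact hmin (k + 1) (by omega)
              have hih := ih (o - 1) (by omega) rest hpre' hmin' (i + 1)
              rw [hih]
              have e_take : (c :: rest).take o = c :: rest.take (o - 1) := by
                conv_lhs => rw [show o = (o-1)+1 from by omega, List.take_succ_cons]
              have e_drop : rest.drop (o - 1) = (c :: rest).drop o := by
                conv_rhs => rw [show o = (o-1)+1 from by omega, List.drop_succ_cons]
              have e_off : i + 1 + ((o - 1 : Nat) : Int) = i + o := by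
                have : ((o - 1 : Nat) : Int) = (o : Int) - 1 := by omega
                rw [this]; ring
              rw [e_take, e_drop, e_off, PySem.List.enumerate_cons]
              simp only [Bool.not_false, Bool.true_and] at hd
              cases hsc : fjbHeadScan (PySem.List.enumerate (rest.take (o - 1)) (i + 1)) with
              | none => simp [fjbHeadScan, hd, hsc]
              | some j => simp [fjbHeadScan, hd, hsc]

lemma goA_think_no_close (n : Nat) : ∀ cs : List Char, cs.length ≤ n → ¬ fjCloseTag <:+: cs →
    ∀ i : Int, findJsonGoA cs i true = -1 := by
  induction n with
  | zero =>
    intro cs h hno i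
    have : cs = [] := List.eq_nil_of_length_eq_zero (Nat.le_zero.mp h)
    subst this; simp [findJsonGoA]
  | succ n ih =>
    intro cs h hno i
    match cs with
    | [] => simp [findJsonGoA]
    | c :: rest =>
      rw [findJsonGoA]
      by_cases h7 : (c :: rest).take 7 = fjOpenTag
      · simp only [if_pos h7]
        have hsuf : (c :: rest).drop 7 <:+: c :: rest := (List.drop_suffix 7 _).isInfix
        exact ih _ (by simp at h ⊢; omega) (fun hx => hno (hx.trans hsuf)) (i + 7)
      · simp only [if_neg h7]
        by_cases h8 : (c :: rest).take 8 = fjCloseTag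
        · exact absurd ((h8 ▸ List.take_prefix 8 (c :: rest)).isInfix) hno
        · simp only [if_neg h8, Bool.not_true, Bool.false_and, Bool.false_eq_true, if_false]
          exact ih rest (by simp at h; omega) (fun hx => hno (List.infix_cons hx)) (i + 1)

lemma goA_think_close (p : Nat) : ∀ cs : List Char, fjCloseTag <+: cs.drop p →
    (∀ k < p, ¬ fjCloseTag <+: cs.drop k) → ∀ i : Int,
    findJsonGoA cs i true = findJsonGoA (cs.drop (p + 8)) (i + p + 8) false := by
  induction p using Nat.strong_induction_on with
  | _ p ih =>
    intro cs hpre hmin i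
    match cs with
    | [] => simp [fjCloseTag] at hpre
    | c :: rest =>
      rw [findJsonGoA]
      by_cases h7 : (c :: rest).take 7 = fjOpenTag
      · simp only [if_pos h7]
        have hp0 : p ≠ 0 := by
          intro hp; subst hp
          simp only [List.drop_zero] at hpre
          have h8eq : (c :: rest).take 8 = fjCloseTag :=
            (List.prefix_iff_eq_take.mp hpre).symm
          have : (c :: rest).take 7 = fjCloseTag.take 7 := by
            rw [← h8eq, List.take_take]
            norm_num
          rw [h7] at this
          simp [fjOpenTag, fjCloseTag] at this
        have h7p : 7 ≤ p := by
          by_contra hlt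
          have hsplit : c :: rest = fjOpenTag ++ (c :: rest).drop 7 := by
            conv_lhs => rw [← List.take_append_drop 7 (c :: rest)]
            rw [h7]
          rw [hsplit] at hpre
          interval_cases p <;>
            simp [fjCloseTag, fjOpenTag, List.cons_prefix_iff] at hpre
        have hpre' : fjCloseTag <+: ((c :: rest).drop 7).drop (p - 7) := by
          rw [List.drop_drop]
          have : 7 + (p - 7) = p := by omega
          rw [this]; exact hpre
        have hmin' : ∀ k < p - 7, ¬ fjCloseTag <+: ((c :: rest).drop 7).drop k := by
          intro k hk
          rw [List.drop_drop]
          exact hmin (7 + k) (by omega)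
        have hih := ih (p - 7) (by omega) ((c :: rest).drop 7) hpre' hmin' (i + 7)
        rw [hih, List.drop_drop]
        have e1 : 7 + (p - 7 + 8) = p + 8 := by omega
        have e2 : i + 7 + ((p - 7 : Nat) : Int) + 8 = i + p + 8 := by
          have : ((p - 7 : Nat) : Int) = (p : Int) - 7 := by omega
          rw [this]; ring
        rw [e1, e2]
      · simp only [if_neg h7]
        by_cases h8 : (c :: rest).take 8 = fjCloseTag
        · simp only [if_pos h8]
          have hp0 : p = 0 := by
            by_contra hp
            exact hmin 0 (by omega) (by simpa using h8 ▸ List.take_prefix 8 (c :: rest))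
          subst hp0
          simp
        · simp only [if_neg h8, Bool.not_true, Bool.false_and, Bool.false_eq_true, if_false]
          have hp0 : p ≠ 0 := by
            intro hp; subst hp
            simp only [List.drop_zero] at hpre
            exact h8 (List.prefix_iff_eq_take.mp hpre).symm
          have hpre' : fjCloseTag <+: rest.drop (p - 1) := by
            have e : rest.drop (p - 1) = (c :: rest).drop p := by
              conv_rhs => rw [show p = (p-1)+1 from by omega, List.drop_succ_cons]
            rw [e]; exact hpre
          have hmin' : ∀ k < p - 1, ¬ fjCloseTag <+: rest.drop k := by
            intro k hk
            have e : rest.drop k = (c :: rest).drop (k + 1) := by rw [List.drop_succ_cons]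
            rw [e]
            exact hmin (k + 1) (by omega)
          have hih := ih (p - 1) (by omega) rest hpre' hmin' (i + 1)
          rw [hih]
          have e1 : p - 1 + 8 + 1 = p + 8 := by omega
          have e2 : i + 1 + ((p - 1 : Nat) : Int) + 8 = i + p + 8 := by
            have : ((p - 1 : Nat) : Int) = (p : Int) - 1 := by omega
            rw [this]; ring
          conv_rhs => rw [show p + 8 = (p - 1 + 8) + 1 from by omega, List.drop_succ_cons]
          rw [e2]

lemma findJsonB_nil : findJsonB [] = -1 := by
  have hf : PySem.Chars.find [] fjOpenTag = -1 := by
    rw [PySem.Chars.find_eq_neg_one_iff]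
    simp [fjOpenTag]
  rw [findJsonB]
  simp [hf, fjbHeadScan]

lemma findJson_main (n : Nat) : ∀ cs : List Char, cs.length ≤ n →
    findJsonGoA cs 0 false = findJsonB cs := by
  induction n with
  | zero =>
    intro cs h
    have : cs = [] := List.eq_nil_of_length_eq_zero (Nat.le_zero.mp h)
    subst this
    rw [findJsonB_nil]
    simp [findJsonGoA]
  | succ n ih =>
    intro cs h
    rw [findJsonB]
    by_cases hno : PySem.Chars.find cs fjOpenTag = -1
    · -- no <think> anywhere
      have hni : ¬ fjOpenTag <:+: cs := (PySem.Chars.find_eq_neg_one_iff cs fjOpenTag).mp hno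
      rw [goA_no_open (n + 1) cs h hni 0]
      simp only [hno, if_pos, dite_true]
      cases hsc : fjbHeadScan (PySem.List.enumerate cs 0) with
      | none => simp
      | some j => simp
    · -- first <think> at position o
      have h0 : 0 ≤ PySem.Chars.find cs fjOpenTag := by
        have := PySem.Chars.neg_one_le_find cs fjOpenTag; omega
      obtain ⟨hpre, hmin⟩ := PySem.Chars.find_spec (s := cs) (sub := fjOpenTag) h0
      set o : Nat := (PySem.Chars.find cs fjOpenTag).toNat with hodef
      have hcast : PySem.Chars.find cs fjOpenTag = (o : Int) := by omega
      rw [goA_to_open o cs hpre hmin 0]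
      have hslice : PySem.List.slice cs none (some (PySem.Chars.find cs fjOpenTag)) = cs.take o := by
        rw [PySem.List.slice_to cs h0]
      simp only [hno, if_false, hslice]
      cases hsc : fjbHeadScan (PySem.List.enumerate (cs.take o) 0) with
      | some j => simp
      | none =>
        -- A side: enter the think block at o
        have hlen7 : o + 7 ≤ cs.length := by
          have := hpre.length_le
          simp [fjOpenTag] at this
          omega
        have hstep : findJsonGoA (cs.drop o) (0 + (o : Int)) false
            = findJsonGoA (cs.drop (o + 7)) ((0 : Int) + o + 7) true := by
          cases hcs : cs.drop o with
          | nil => rw [hcs] at hpre; simp [fjOpenTag] at hpre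
          | cons d ds =>
            rw [findJsonGoA]
            have h7 : (d :: ds).take 7 = fjOpenTag := by
              rw [← hcs]
              have := List.prefix_iff_eq_take.mp hpre
              simpa [fjOpenTag] using this.symm
            rw [if_pos h7, ← hcs, List.drop_drop]
        rw [hstep]
        -- B side: findFrom for the closing tag
        have hfcast : PySem.Chars.find cs fjOpenTag + 7 = ((o + 7 : Nat) : Int) := by
          push_cast; omega
        rw [hfcast, PySem.Chars.findFrom_natCast cs fjCloseTag (o + 7) hlen7]
        by_cases hcf : PySem.Chars.find (cs.drop (o + 7)) fjCloseTag = -1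
        · -- no closing tag: everything after is inside the block
          have hnc : ¬ fjCloseTag <:+: cs.drop (o + 7) :=
            (PySem.Chars.find_eq_neg_one_iff _ _).mp hcf
          rw [goA_think_no_close (cs.drop (o + 7)).length _ le_rfl hnc]
          simp [hcf]
        · have hp0 : 0 ≤ PySem.Chars.find (cs.drop (o + 7)) fjCloseTag := by
            have := PySem.Chars.neg_one_le_find (cs.drop (o + 7)) fjCloseTag; omega
          obtain ⟨hcpre, hcmin⟩ := PySem.Chars.find_spec
            (s := cs.drop (o + 7)) (sub := fjCloseTag) hp0
          set p : Nat := (PySem.Chars.find (cs.drop (o + 7)) fjCloseTag).toNat with hpdef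
          have hpcast : PySem.Chars.find (cs.drop (o + 7)) fjCloseTag = (p : Int) := by omega
          rw [goA_think_close p (cs.drop (o + 7)) hcpre hcmin ((0 : Int) + o + 7)]
          rw [List.drop_drop]
          -- the recursive suffix
          have hsuf : PySem.List.slice cs (some ((o + 7 : Nat) + PySem.Chars.find (cs.drop (o + 7)) fjCloseTag + 8)) none
              = cs.drop (o + 7 + (p + 8)) := by
            rw [hpcast]
            have e : ((o + 7 : Nat) : Int) + (p : Int) + 8 = ((o + 7 + (p + 8) : Nat) : Int) := by
              push_cast; ring
            rw [e, PySem.List.slice_from cs (by positivity), Int.toNat_natCast]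
          have hif : ¬ ((o + 7 : Nat) : Int) + PySem.Chars.find (cs.drop (o + 7)) fjCloseTag = -1 := by
            rw [hpcast]; push_cast; omega
          simp only [hcf, if_false, hsuf, dite_false]
          have hlt : (cs.drop (o + 7 + (p + 8))).length ≤ n := by
            simp only [List.length_drop]
            omega
          rw [← ih (cs.drop (o + 7 + (p + 8))) hlt]
          have hshift := goA_shift (cs.drop (o + 7 + (p + 8))).length _ le_rfl
            ((0 : Int) + o + 7 + p + 8) false (by positivity)
          rw [hshift]
          rcases goA_ge (cs.drop (o + 7 + (p + 8))).length _ le_rfl 0 false with h' | h' <;>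
            split_ifs <;> push_cast <;> omega

-- ===== VERDICT (by name: the statement is the Claim_ definition above) =====
theorem find_json_start_py_spec : Claim_equal_find_json_start_py := by
  intro text _
  unfold Spec_find_json_start_py find_json_start_py find_json_start_py_alt
  exact findJson_main text.toList.length text.toList le_rfl
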